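-- pv_equiv track=rewrite | github.com/EmanuelML64/ayed-2025-tps | TP3/# TP 3 ejercicio 2.py | matriz_f
-- ===== SOURCE A (Python) =====
-- def matriz_f(N:int)->list[list]:
--     '''Genera una matriz de numeros que aumentan de derecha a izquierda, aumentando una columna mas
--     a la derecha cada vez que desciende una fila.
--     Precondiciones: numero entero para determinar las dimensiones de la matriz.
--     Poscondiciones: matriz de numeros que aumentan de derecha a izquierda.'''
--     m = [[0]*N for _ in range(N)]
--     cnt = 1
--     for i in range(N):
--
--         for j in range(N-1, N-2-i, -1):
--             m[i][j] = cnt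
--             cnt += 1
--     return m
-- ===== SOURCE B (Python) =====
-- def matriz_f(N: int) -> list[list]:
--     # Stateless closed form per row: row i is N-1-i zeros followed by the
--     # descending run from i*(i+1)//2 + i + 1 down to i*(i+1)//2 + 1.
--     return [[0] * (N - 1 - i) + list(range(i * (i + 1) // 2 + i + 1, i * (i + 1) // 2, -1))
--             for i in range(N)]
-- ===== Notes on version B (the rewrite author's own statement) =====
-- stated objective: alternative
-- what changed: Replaced A's in-place matrix mutation driven by a sequential counter over a triangular countdown loop by a stateless comprehension that builds each row in closed form from its row index: a zero prefix concatenated with a descending range derived from the triangular number i*(i+1)//2.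
import Mathlib
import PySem

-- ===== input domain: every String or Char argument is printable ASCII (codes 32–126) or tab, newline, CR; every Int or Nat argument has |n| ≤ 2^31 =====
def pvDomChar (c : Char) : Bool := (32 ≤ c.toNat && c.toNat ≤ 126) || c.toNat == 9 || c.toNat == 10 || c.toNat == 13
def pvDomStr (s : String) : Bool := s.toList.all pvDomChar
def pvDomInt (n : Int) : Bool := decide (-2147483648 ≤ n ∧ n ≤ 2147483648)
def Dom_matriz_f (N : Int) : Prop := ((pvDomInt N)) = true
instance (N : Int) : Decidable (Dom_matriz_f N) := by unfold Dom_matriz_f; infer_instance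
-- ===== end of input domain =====

-- B replaces A's in-place mutation with a running counter by a stateless comprehension building each row in closed form from its index (alternative decomposition).

-- ===== PORT A =====
def matriz_f (N : Int) : List (List Int) :=
  let m := (PySem.List.pyRange 0 N 1).map (fun _ => List.replicate N.toNat 0)
  let res := (PySem.List.pyRange 0 N 1).foldl
    (fun (st : List (List Int) × Int) i =>
      (PySem.List.pyRange (N - 1) (N - 2 - i) (-1)).foldl
        (fun (st2 : List (List Int) × Int) j =>
          (PySem.List.pySetD st2.1 i (PySem.List.pySetD (PySem.List.pyGetD st2.1 i []) j st2.2),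
           st2.2 + 1))
        st)
    (m, 1)
  res.1

-- ===== PORT B =====
def matriz_f_alt (N : Int) : List (List Int) :=
  (PySem.List.pyRange 0 N 1).map (fun i =>
    List.replicate (N - 1 - i).toNat 0 ++
      PySem.List.pyRange (PySem.Int.floordiv (i * (i + 1)) 2 + i + 1)
        (PySem.Int.floordiv (i * (i + 1)) 2) (-1))

-- ===== PRECONDITION & SPEC =====
def Spec_matriz_f (N : Int) (out : List (List Int)) : Prop := out = matriz_f_alt N
instance (N : Int) (out : List (List Int)) : Decidable (Spec_matriz_f N out) := by unfold Spec_matriz_f; infer_instance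

-- ===== CLAIM (what is proved, stated in full; the proofs are below) =====
def Claim_equal_matriz_f : Prop := ∀ (N : Int), Dom_matriz_f N → Spec_matriz_f N (matriz_f N)

-- ===== LEMMAS AND PROOFS =====

-- the inner (row-updating) step of A, on a single row
def pvRowStep (st : List Int × Int) (j : Int) : List Int × Int :=
  (PySem.List.pySetD st.1 j st.2, st.2 + 1)

-- the inner step of A on the whole matrix, for fixed row index i
def pvMatStep (i : Int) (st : List (List Int) × Int) (j : Int) : List (List Int) × Int :=
  (PySem.List.pySetD st.1 i (PySem.List.pySetD (PySem.List.pyGetD st.1 i []) j st.2), st.2 + 1)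

-- triangular numbers
def pvTri : Nat → Nat
  | 0 => 0
  | i + 1 => pvTri i + (i + 1)

lemma pvTri_closed (i : Nat) : 2 * pvTri i = i * (i + 1) := by
  induction i with
  | zero => rfl
  | succ k ih =>
    unfold pvTri
    have h : (k + 1) * (k + 1 + 1) = k * (k + 1) + 2 * (k + 1) := by ring
    omega

lemma pvTri_floordiv (i : Nat) :
    PySem.Int.floordiv ((i : Int) * ((i : Int) + 1)) 2 = (pvTri i : Int) := by
  have h2 : ((i : Int) * ((i : Int) + 1)) = 2 * (pvTri i : Int) := by exact_mod_cast (pvTri_closed i).symm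
  rw [h2, PySem.Int.floordiv, Int.mul_fdiv_cancel_left _ (by norm_num)]

-- the final value of row i (for 0 ≤ i < N), n = N.toNat
def pvRow (N : Int) (n : Nat) (i : Nat) : List Int :=
  (List.range n).map (fun (j : Nat) =>
    if N - 1 - (i : Int) ≤ (j : Int) then (pvTri i : Int) + (N - (j : Int)) else 0)

-- matrix after the first i outer iterations
def pvMat (N : Int) (n : Nat) (i : Nat) : List (List Int) :=
  (List.range n).map (fun k => if k < i then pvRow N n k else List.replicate n 0)

-- counter value after the first i outer iterations
def pvCnt (i : Nat) : Int := 1 + (pvTri i : Int)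

-- generic: the row fold preserves length and adds the list length to the counter
lemma pvRowStep_len (L : List Int) : ∀ (r : List Int) (c : Int),
    ((L.foldl pvRowStep (r, c)).1.length = r.length) ∧
    ((L.foldl pvRowStep (r, c)).2 = c + L.length) := by
  induction L with
  | nil => intro r c; simp
  | cons x xs ih =>
    intro r c
    have := ih (PySem.List.pySetD r x c) (c + 1)
    simp only [List.foldl_cons, pvRowStep] at *
    constructor
    · rw [this.1, PySem.List.length_pySetD]
    · rw [this.2]; simp; ring

-- pointwise value of the countdown fold on a row
lemma pvCountdown (d : Nat) : ∀ (a b : Int) (r : List Int) (c : Int) (k : Nat),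
    (a - b).toNat = d → -1 ≤ b → (a : Int) < (r.length : Int) → k < r.length →
    (((PySem.List.pyRange a b (-1)).foldl pvRowStep (r, c)).1)[k]?
      = some (if b < (k : Int) ∧ (k : Int) ≤ a then c + (a - k) else r[k]!) := by
  induction d with
  | zero =>
    intro a b r c k hd hb ha hk
    have hab : a ≤ b := by omega
    rw [PySem.List.pyRange_neg_one_eq_nil hab]
    simp only [List.foldl_nil]
    have : ¬ (b < (k : Int) ∧ (k : Int) ≤ a) := by omega
    rw [if_neg this]
    rw [List.getElem?_eq_getElem hk, List.getElem!_eq_getElem?_getD, List.getElem?_eq_getElem hk]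
    simp
  | succ d ih =>
    intro a b r c k hd hb ha hk
    have hba : b < a := by omega
    rw [PySem.List.pyRange_neg_one_cons hba]
    simp only [List.foldl_cons, pvRowStep]
    have ha0 : 0 ≤ a := by omega
    have hset : PySem.List.pySetD r a c = r.set a.toNat c := PySem.List.pySetD_of_nonneg r c ha0
    have hlen : (r.set a.toNat c).length = r.length := by simp
    have := ih (a - 1) b (r.set a.toNat c) (c + 1) k (by omega) hb
      (by rw [hlen]; omega) (by omega)
    rw [hset, this]
    by_cases hka : (k : Int) = a
    · have h1 : b < (k : Int) ∧ (k : Int) ≤ a := by omega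
      have h2 : ¬ (b < (k : Int) ∧ (k : Int) ≤ a - 1) := by omega
      rw [if_neg h2, if_pos h1]
      have hkn : k = a.toNat := by omega
      subst hkn
      rw [List.getElem!_eq_getElem?_getD, List.getElem?_set_self (by omega)]
      simp; omega
    · have hkn : k ≠ a.toNat := by omega
      have hget : (r.set a.toNat c)[k]! = r[k]! := by
        rw [List.getElem!_eq_getElem?_getD, List.getElem!_eq_getElem?_getD,
          List.getElem?_set_ne (by omega)]
      rw [hget]
      by_cases h : b < (k : Int) ∧ (k : Int) ≤ a
      · have h' : b < (k : Int) ∧ (k : Int) ≤ a - 1 := by omega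
        rw [if_pos h', if_pos h]
        congr 1; omega
      · have h' : ¬ (b < (k : Int) ∧ (k : Int) ≤ a - 1) := by omega
        rw [if_neg h', if_neg h]

-- lifting: the matrix fold for fixed i is the row fold on row i, written back
lemma pvLift (L : List Int) : ∀ (m : List (List Int)) (c : Int) (i : Int)
    (hi : 0 ≤ i) (him : i < m.length),
    L.foldl (pvMatStep i) (m, c)
      = (PySem.List.pySetD m i (L.foldl pvRowStep (PySem.List.pyGetD m i [], c)).1,
         (L.foldl pvRowStep (PySem.List.pyGetD m i [], c)).2) := by
  induction L with
  | nil =>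
    intro m c i hi him
    simp only [List.foldl_nil]
    rw [PySem.List.pySetD_of_nonneg m _ hi,
      PySem.List.pyGetD_eq_getElem m [] hi him, List.set_getElem_self]
  | cons x xs ih =>
    intro m c i hi him
    simp only [List.foldl_cons]
    have hstep : pvMatStep i (m, c) x
        = (PySem.List.pySetD m i (pvRowStep (PySem.List.pyGetD m i [], c) x).1,
           (pvRowStep (PySem.List.pyGetD m i [], c) x).2) := rfl
    rw [hstep]
    set r1 := (pvRowStep (PySem.List.pyGetD m i [], c) x).1 with hr1
    have hsetm : PySem.List.pySetD m i r1 = m.set i.toNat r1 := PySem.List.pySetD_of_nonneg m r1 hi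
    have hlen : (m.set i.toNat r1).length = m.length := by simp
    rw [ih _ _ i hi (by rw [hsetm, hlen]; omega)]
    have hget : PySem.List.pyGetD (PySem.List.pySetD m i r1) i [] = r1 := by
      rw [hsetm, PySem.List.pyGetD_eq_getElem _ [] hi (by rw [hlen]; exact him)]
      exact List.getElem_set_self (by omega)
    rw [hget]
    congr 1
    rw [hsetm, PySem.List.pySetD_of_nonneg _ _ hi, PySem.List.pySetD_of_nonneg _ _ hi, List.set_set]

-- the row produced by the inner loop at outer index t is pvRow
lemma pvStep (n : Nat) (N : Int) (hN : N = (n : Int)) (t : Nat) (ht : t < n) :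
    (PySem.List.pyRange (N - 1) (N - 2 - (t : Int)) (-1)).foldl (pvMatStep (t : Int))
        (pvMat N n t, pvCnt t)
      = (pvMat N n (t + 1), pvCnt (t + 1)) := by
  have hlenM : (pvMat N n t).length = n := by simp [pvMat]
  have hi0 : (0 : Int) ≤ (t : Int) := by positivity
  have him : (t : Int) < ((pvMat N n t).length : Int) := by rw [hlenM]; exact_mod_cast ht
  rw [pvLift _ _ _ (t : Int) hi0 him]
  have hrow : PySem.List.pyGetD (pvMat N n t) (t : Int) [] = List.replicate n 0 := by
    rw [PySem.List.pyGetD_eq_getElem _ [] hi0 him]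
    simp [pvMat]
  rw [hrow]
  have hL := pvRowStep_len (PySem.List.pyRange (N - 1) (N - 2 - (t : Int)) (-1))
    (List.replicate n 0) (pvCnt t)
  have hLen : (PySem.List.pyRange (N - 1) (N - 2 - (t : Int)) (-1)).length = t + 1 := by
    rw [PySem.List.length_pyRange_neg_one]
    omega
  have hfold : ((PySem.List.pyRange (N - 1) (N - 2 - (t : Int)) (-1)).foldl pvRowStep
      (List.replicate n 0, pvCnt t)).1 = pvRow N n t := by
    apply List.ext_getElem?
    intro k
    by_cases hk : k < n
    · rw [pvCountdown ((N - 1 - (N - 2 - (t : Int))).toNat) (N - 1) (N - 2 - (t : Int))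
        (List.replicate n 0) (pvCnt t) k rfl (by omega) (by simp; omega) (by simp; omega)]
      have hpr : (pvRow N n t)[k]? = some (if N - 1 - (t : Int) ≤ (k : Int)
          then ((pvTri t : Int)) + (N - (k : Int)) else 0) := by
        unfold pvRow
        rw [List.getElem?_map, List.getElem?_range hk]
        rfl
      rw [hpr]
      congr 1
      by_cases hc : N - 1 - (t : Int) ≤ (k : Int)
      · rw [if_pos (by omega), if_pos hc]
        simp [pvCnt]; omega
      · rw [if_neg (by omega), if_neg hc]
        simp [List.getElem!_eq_getElem?_getD, hk]
    · have h1 : (((PySem.List.pyRange (N - 1) (N - 2 - (t : Int)) (-1)).foldl pvRowStep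
          (List.replicate n 0, pvCnt t)).1).length ≤ k := by
        rw [hL.1]; simp; omega
      have h2 : (pvRow N n t).length ≤ k := by simp [pvRow]; omega
      rw [List.getElem?_eq_none h1, List.getElem?_eq_none h2]
  rw [hfold, hL.2, hLen]
  refine Prod.ext_iff.mpr ⟨?_, ?_⟩
  · rw [PySem.List.pySetD_of_nonneg _ _ hi0]
    apply List.ext_getElem
    · simp [pvMat]
    · intro k hk1 hk2
      have hkn : k < n := by simp [pvMat] at hk2; omega
      rw [List.getElem_set]
      simp only [pvMat, List.getElem_map, List.getElem_range,
        Int.toNat_natCast]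
      by_cases hkt : k = t
      · subst hkt; simp
      · rw [if_neg (by omega)]
        by_cases hlt : k < t
        · rw [if_pos hlt, if_pos (by omega)]
        · rw [if_neg hlt, if_neg (by omega)]
  · simp only [pvCnt, pvTri]
    push_cast
    ring

-- the outer loop from index t onwards completes pvMat to pvMat … n
lemma pvOuter (n : Nat) (N : Int) (hN : N = (n : Int)) : ∀ (d t : Nat), t + d = n →
    (PySem.List.pyRange (t : Int) N 1).foldl
      (fun st i => (PySem.List.pyRange (N - 1) (N - 2 - i) (-1)).foldl (pvMatStep i) st)
      (pvMat N n t, pvCnt t)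
      = (pvMat N n n, pvCnt n) := by
  intro d
  induction d with
  | zero =>
    intro t htn
    have : t = n := by omega
    subst this
    rw [PySem.List.pyRange_one_eq_nil (by omega)]
    simp
  | succ d ih =>
    intro t htn
    have htN : (t : Int) < N := by omega
    rw [PySem.List.pyRange_one_cons htN]
    simp only [List.foldl_cons]
    rw [pvStep n N hN t (by omega)]
    have : ((t : Int) + 1) = (((t + 1 : Nat)) : Int) := by push_cast; ring
    rw [this, ih (t + 1) (by omega)]

-- B's port equals pvMat
lemma pvAltEq (n : Nat) (N : Int) (hN : N = (n : Int)) :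
    matriz_f_alt N = pvMat N n n := by
  unfold matriz_f_alt pvMat
  rw [hN, PySem.List.pyRange_zero_nat, List.map_map]
  apply List.map_congr_left
  intro i hi
  have hin : i < n := List.mem_range.mp hi
  rw [if_pos hin]
  simp only [Function.comp]
  rw [pvTri_floordiv i, PySem.List.pyRange_neg_one]
  have harg : ((pvTri i : Int) + (i : Int) + 1 - (pvTri i : Int)).toNat = i + 1 := by omega
  rw [harg]
  have hz : (((n : Int) - 1 - (i : Int)).toNat) = n - 1 - i := by omega
  apply List.ext_getElem
  · simp [pvRow, hz]; omega
  · intro k hk1 hk2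
    have hkn : k < n := by simpa [pvRow] using hk2
    rw [List.getElem_append]
    simp only [pvRow, List.getElem_map, List.getElem_range, List.length_replicate, hz]
    split
    · rename_i hlt
      rw [List.getElem_replicate, if_neg (by omega)]
    · rename_i hge
      rw [if_pos (by omega)]
      have : (↑(k - (n - 1 - i)) : Int) = (k : Int) - ((n : Int) - 1 - (i : Int)) := by omega
      rw [this]
      ring

theorem matriz_f_spec : Claim_equal_matriz_f := by
  intro N _
  unfold Spec_matriz_f
  show ((PySem.List.pyRange 0 N 1).foldl
      (fun st i => (PySem.List.pyRange (N - 1) (N - 2 - i) (-1)).foldl (pvMatStep i) st)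
      ((PySem.List.pyRange 0 N 1).map (fun _ => List.replicate N.toNat 0), 1)).1
    = matriz_f_alt N
  by_cases h0 : 0 ≤ N
  · set n := N.toNat with hn
    have hN : N = (n : Int) := (Int.toNat_of_nonneg h0).symm
    have hm0 : (PySem.List.pyRange 0 N 1).map (fun _ => List.replicate N.toNat 0)
        = pvMat N n 0 := by
      rw [hN, PySem.List.pyRange_zero_nat, List.map_map, pvMat]
      apply List.map_congr_left
      intro k _
      simp
    have hpair : ((pvMat N n 0, (1 : Int)) : List (List Int) × Int)
        = (pvMat N n 0, pvCnt 0) := by simp [pvCnt, pvTri]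
    rw [hm0, hpair]
    have h00 : ((0 : Nat) : Int) = (0 : Int) := by norm_num
    rw [← h00, pvOuter n N hN n 0 (by omega)]
    rw [pvAltEq n N hN]
  · have hneg : N < 0 := by omega
    rw [PySem.List.pyRange_one_eq_nil (by omega)]
    simp [matriz_f_alt, PySem.List.pyRange_one_eq_nil (by omega : N ≤ 0)]
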